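-- pv_equiv track=rewrite | github.com/avniproject/avni-ai | dify/knowledge_base/tools/generate_kb.py | _split_at_headings
-- ===== SOURCE A (Python) =====
-- def _split_at_headings(text):
--     """Split text into (heading, content) tuples at ## boundaries."""
--     sections = []
--     current_heading = None
--     current_lines = []
--
--     for line in text.split("\n"):
--         if line.startswith("## "):
--             # Save previous section
--             if current_heading is not None or current_lines:
--                 sections.append((current_heading, "\n".join(current_lines).strip()))
--             current_heading = line[3:].strip()
--             current_lines = []
--         else:
--             current_lines.append(line)
--
--     # Save last section
--     if current_heading is not None or current_lines:
--         sections.append((current_heading, "\n".join(current_lines).strip()))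
--
--     # Filter out empty sections and sections with no heading (preamble text)
--     # Keep preamble only if it has substantial content
--     result = []
--     for heading, content in sections:
--         if heading is None:
--             if len(content.split()) > 20:  # Keep preamble if substantial
--                 result.append(("Overview", content))
--         elif content:
--             result.append((heading, content))
--
--     return result
-- ===== SOURCE B (Python) =====
-- def _split_at_headings(text):
--     """Split text into (heading, content) tuples at ## boundaries."""
--     lines = text.split("\n")
--     is_head = lambda l: l.startswith("## ")
--     result = []
--     pre_lines = []
--     i = 0
--     while i < len(lines) and not is_head(lines[i]):
--         pre_lines.append(lines[i])
--         i += 1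
--     pre = "\n".join(pre_lines).strip()
--     if len(pre.split()) > 20:
--         result.append(("Overview", pre))
--     while i < len(lines):
--         heading = lines[i][3:].strip()
--         j = i + 1
--         body = []
--         while j < len(lines) and not is_head(lines[j]):
--             body.append(lines[j])
--             j += 1
--         content = "\n".join(body).strip()
--         if content:
--             result.append((heading, content))
--         i = j
--     return result
-- ===== Notes on version B (the rewrite author's own statement) =====
-- stated objective: alternative
-- what changed: Replaces A's single stateful scan (optional current-heading + pending-lines accumulator, then a second filtering pass over collected sections) with a direct span decomposition: take the preamble prefix, then repeatedly split off each heading and its body span, emitting each kept section immediately with no intermediate section list and no Optional heading state.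
import Mathlib
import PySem

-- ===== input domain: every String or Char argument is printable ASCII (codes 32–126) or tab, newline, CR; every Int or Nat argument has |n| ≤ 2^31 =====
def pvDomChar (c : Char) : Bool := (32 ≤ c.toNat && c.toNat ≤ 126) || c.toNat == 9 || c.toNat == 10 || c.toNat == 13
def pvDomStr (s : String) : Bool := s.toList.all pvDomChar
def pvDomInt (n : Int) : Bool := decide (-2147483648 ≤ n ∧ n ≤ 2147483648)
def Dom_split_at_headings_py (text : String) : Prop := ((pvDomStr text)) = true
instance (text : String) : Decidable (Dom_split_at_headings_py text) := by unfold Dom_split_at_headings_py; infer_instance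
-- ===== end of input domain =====

-- B replaces A's stateful accumulator scan + post-filter by a span decomposition emitting sections directly (alternative, same cost).

-- ===== PORT A =====
-- one loop step of A's 'for line in text.split("\n")': state = (sections, current_heading, current_lines)
def pvStepA (st : List (Option String × String) × Option String × List String) (line : String) :
    List (Option String × String) × Option String × List String :=
  if PySem.Str.startswith line "## " then
    ((if st.2.1.isSome ∨ st.2.2 ≠ [] then
        st.1 ++ [(st.2.1, PySem.Str.strip (PySem.Str.join "\n" st.2.2))]
      else st.1),
     some (PySem.Str.strip (PySem.Str.slice line (some 3) none)), [])
  else (st.1, st.2.1, st.2.2 ++ [line])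

-- one step of A's filtering loop over sections
def pvFiltStepA (res : List (String × String)) (hc : Option String × String) : List (String × String) :=
  match hc.1 with
  | none => if (PySem.Str.split₀ hc.2).length > 20 then res ++ [("Overview", hc.2)] else res
  | some h => if hc.2 ≠ "" then res ++ [(h, hc.2)] else res

def split_at_headings_py (text : String) : List (String × String) :=
  let lines := (PySem.Str.split? text "\n").getD []
  let st := lines.foldl pvStepA ([], none, [])
  let sections :=
    if st.2.1.isSome ∨ st.2.2 ≠ [] then
      st.1 ++ [(st.2.1, PySem.Str.strip (PySem.Str.join "\n" st.2.2))]
    else st.1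
  sections.foldl pvFiltStepA []

-- ===== PORT B =====
def pvNotHead (l : String) : Bool := !(PySem.Str.startswith l "## ")

-- B's outer while-loop: lines begins with a heading line (or is empty); split off heading + body span
def pvGo (lines : List String) : List (String × String) :=
  match lines with
  | [] => []
  | l :: ls =>
    let body := ls.takeWhile pvNotHead
    let rest := ls.dropWhile pvNotHead
    let content := PySem.Str.strip (PySem.Str.join "\n" body)
    (if content ≠ "" then [(PySem.Str.strip (PySem.Str.slice l (some 3) none), content)] else [])
      ++ pvGo rest
termination_by lines.length
decreasing_by
  exact Nat.lt_succ_of_le (List.length_dropWhile_le pvNotHead ls)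

def split_at_headings_py_alt (text : String) : List (String × String) :=
  let lines := (PySem.Str.split? text "\n").getD []
  let pre := PySem.Str.strip (PySem.Str.join "\n" (lines.takeWhile pvNotHead))
  (if (PySem.Str.split₀ pre).length > 20 then [("Overview", pre)] else [])
    ++ pvGo (lines.dropWhile pvNotHead)

-- ===== PRECONDITION & SPEC =====
def Spec_split_at_headings_py (text : String) (out : List (String × String)) : Prop := out = split_at_headings_py_alt text
instance (text : String) (out : List (String × String)) : Decidable (Spec_split_at_headings_py text out) := by unfold Spec_split_at_headings_py; infer_instance

-- ===== CLAIM (what is proved, stated in full; the proofs are below) =====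
def Claim_equal_split_at_headings_py : Prop := ∀ (text : String), Dom_split_at_headings_py text → Spec_split_at_headings_py text (split_at_headings_py text)

-- ===== LEMMAS AND PROOFS =====
-- A's "save section" step, abstracted
def pvClose (h : Option String) (cur : List String) : List (Option String × String) :=
  if h.isSome ∨ cur ≠ [] then [(h, PySem.Str.strip (PySem.Str.join "\n" cur))] else []

-- the sections list A's first loop produces from state (h, cur) on remaining lines
def pvSecs (h : Option String) (cur : List String) : List String → List (Option String × String)
  | [] => pvClose h cur
  | l :: ls =>
    if PySem.Str.startswith l "## " then
      pvClose h cur ++ pvSecs (some (PySem.Str.strip (PySem.Str.slice l (some 3) none))) [] ls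
    else
      pvSecs h (cur ++ [l]) ls

-- A's second loop as a filterMap-style recursion
def pvFilt : List (Option String × String) → List (String × String)
  | [] => []
  | (none, c) :: rest =>
      (if (PySem.Str.split₀ c).length > 20 then [("Overview", c)] else []) ++ pvFilt rest
  | (some h, c) :: rest =>
      (if c ≠ "" then [(h, c)] else []) ++ pvFilt rest

theorem pvGo_nil : pvGo [] = [] := by rw [pvGo.eq_def]

theorem pvGo_cons (l : String) (ls : List String) :
    pvGo (l :: ls) =
      (if PySem.Str.strip (PySem.Str.join "\n" (ls.takeWhile pvNotHead)) ≠ "" then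
        [(PySem.Str.strip (PySem.Str.slice l (some 3) none),
          PySem.Str.strip (PySem.Str.join "\n" (ls.takeWhile pvNotHead)))]
      else []) ++ pvGo (ls.dropWhile pvNotHead) := by
  rw [pvGo.eq_def]

theorem pvSecsA (ls : List String) (acc : List (Option String × String)) (h : Option String) (cur : List String) :
    (if (ls.foldl pvStepA (acc, h, cur)).2.1.isSome ∨ (ls.foldl pvStepA (acc, h, cur)).2.2 ≠ [] then
       (ls.foldl pvStepA (acc, h, cur)).1 ++
         [((ls.foldl pvStepA (acc, h, cur)).2.1, PySem.Str.strip (PySem.Str.join "\n" (ls.foldl pvStepA (acc, h, cur)).2.2))]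
     else (ls.foldl pvStepA (acc, h, cur)).1) = acc ++ pvSecs h cur ls := by
  induction ls generalizing acc h cur with
  | nil => simp only [List.foldl_nil, pvSecs, pvClose]; split_ifs <;> simp
  | cons l ls ih =>
    simp only [List.foldl_cons, pvStepA, pvSecs]
    cases hs : PySem.Str.startswith l "## " with
    | true =>
      simp only [if_true]
      rw [ih]
      by_cases hc : h.isSome ∨ cur ≠ []
      · simp [pvClose, hc]
      · simp [pvClose, hc]
    | false =>
      simp only [Bool.false_eq_true, if_false]
      rw [ih]

theorem pvFiltA (secs : List (Option String × String)) (res : List (String × String)) :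
    secs.foldl pvFiltStepA res = res ++ pvFilt secs := by
  induction secs generalizing res with
  | nil => simp [pvFilt]
  | cons hc rest ih =>
    obtain ⟨h, c⟩ := hc
    cases h with
    | none =>
      simp only [List.foldl_cons, pvFiltStepA, pvFilt]
      rw [ih]; split_ifs <;> simp
    | some h =>
      simp only [List.foldl_cons, pvFiltStepA, pvFilt]
      rw [ih]; split_ifs <;> simp

theorem pvFilt_append (xs ys : List (Option String × String)) :
    pvFilt (xs ++ ys) = pvFilt xs ++ pvFilt ys := by
  induction xs with
  | nil => simp [pvFilt]
  | cons hc rest ih =>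
    obtain ⟨h, c⟩ := hc
    cases h <;> simp [pvFilt, ih]

theorem pvFilt_close_some (h : String) (cur : List String) :
    pvFilt (pvClose (some h) cur) =
      (if PySem.Str.strip (PySem.Str.join "\n" cur) ≠ "" then
        [(h, PySem.Str.strip (PySem.Str.join "\n" cur))] else []) := by
  simp only [pvClose, Option.isSome_some, true_or, if_pos]
  split_ifs <;> simp_all [pvFilt]

theorem pvFilt_some (ls : List String) (h : String) (cur : List String) :
    pvFilt (pvSecs (some h) cur ls) =
      (if PySem.Str.strip (PySem.Str.join "\n" (cur ++ ls.takeWhile pvNotHead)) ≠ "" then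
        [(h, PySem.Str.strip (PySem.Str.join "\n" (cur ++ ls.takeWhile pvNotHead)))] else [])
        ++ pvGo (ls.dropWhile pvNotHead) := by
  induction ls generalizing h cur with
  | nil =>
    simp only [pvSecs, List.takeWhile_nil, List.dropWhile_nil, List.append_nil, pvGo_nil,
      pvFilt_close_some]
  | cons l ls ih =>
    cases hs : PySem.Str.startswith l "## " with
    | true =>
      have hn : pvNotHead l = false := by simp only [pvNotHead, hs, Bool.not_true]
      simp only [pvSecs, hs, if_true, pvFilt_append, List.takeWhile_cons, hn,
        Bool.false_eq_true, if_false, List.dropWhile_cons, List.append_nil, pvGo_cons]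
      rw [ih, pvFilt_close_some]
      simp
    | false =>
      have hn : pvNotHead l = true := by simp only [pvNotHead, hs, Bool.not_false]
      simp only [pvSecs, hs, Bool.false_eq_true, if_false, List.takeWhile_cons, hn,
        if_true, List.dropWhile_cons]
      rw [ih]
      simp

theorem pvFilt_close_none (cur : List String) :
    pvFilt (pvClose none cur) =
      (if (PySem.Str.split₀ (PySem.Str.strip (PySem.Str.join "\n" cur))).length > 20 then
        [("Overview", PySem.Str.strip (PySem.Str.join "\n" cur))] else []) := by
  by_cases hc : cur = []
  · subst hc
    simp only [pvClose]
    norm_num [pvFilt]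
    decide
  · simp [pvClose, hc, pvFilt]

theorem pvFilt_none (ls : List String) (cur : List String) :
    pvFilt (pvSecs none cur ls) =
      (if (PySem.Str.split₀ (PySem.Str.strip (PySem.Str.join "\n" (cur ++ ls.takeWhile pvNotHead)))).length > 20 then
        [("Overview", PySem.Str.strip (PySem.Str.join "\n" (cur ++ ls.takeWhile pvNotHead)))] else [])
        ++ pvGo (ls.dropWhile pvNotHead) := by
  induction ls generalizing cur with
  | nil =>
    simp only [pvSecs, List.takeWhile_nil, List.dropWhile_nil, List.append_nil, pvGo_nil,
      pvFilt_close_none]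
  | cons l ls ih =>
    cases hs : PySem.Str.startswith l "## " with
    | true =>
      have hn : pvNotHead l = false := by simp only [pvNotHead, hs, Bool.not_true]
      simp only [pvSecs, hs, if_true, pvFilt_append, List.takeWhile_cons, hn,
        Bool.false_eq_true, if_false, List.dropWhile_cons, List.append_nil, pvGo_cons]
      rw [pvFilt_some, pvFilt_close_none]
      simp
    | false =>
      have hn : pvNotHead l = true := by simp only [pvNotHead, hs, Bool.not_false]
      simp only [pvSecs, hs, Bool.false_eq_true, if_false, List.takeWhile_cons, hn,
        if_true, List.dropWhile_cons]
      rw [ih]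
      simp

-- ===== VERDICT (by name: the statement is the Claim_ definition above) =====
theorem split_at_headings_py_spec : Claim_equal_split_at_headings_py := by
  intro text _
  unfold Spec_split_at_headings_py split_at_headings_py split_at_headings_py_alt
  simp only [pvFiltA, pvSecsA, List.nil_append, pvFilt_none, List.nil_append]
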